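-- pv_equiv track=rewrite | github.com/huncholane/kickstart | 4_graphs/preclass/dfs_traversal.py | dfs_traversal
-- ===== SOURCE A (Python) =====
-- def dfs_traversal(n, edges):
--     adj_list = [[] for _ in range(n)]
--     for e in edges:
--         adj_list[e[0]].append(e[1])
--         adj_list[e[1]].append(e[0])
--     visited = [False] * n
--     captured = []
--     parent = [None] * n
--     connected_components = []
--
--     def dfs(s):
--         visited[s] = True
--         captured.append(s)
--         connected_components[-1].append(s)
--         for w in adj_list[s]:
--             if not visited[w]:
--                 parent[w] = s
--                 dfs(w)
--
--     for i in range(n):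
--         if not visited[i]:
--             connected_components.append([])
--             dfs(i)
--     return captured, connected_components
-- ===== SOURCE B (Python) =====
-- def dfs_traversal(n, edges):
--     adj = [[] for _ in range(n)]
--     for e in edges:
--         for u, v in ((e[0], e[1]), (e[1], e[0])):
--             adj[u].append(v)
--     visited = [False] * n
--     order = []
--     cuts = []
--     for i in range(n):
--         if visited[i]:
--             continue
--         cuts.append(len(order))
--         stack = [i]
--         while stack:
--             s = stack.pop()
--             if visited[s]:
--                 continue
--             visited[s] = True
--             order.append(s)
--             stack.extend(reversed(adj[s]))
--     comps = [order[a:b] for a, b in zip(cuts, cuts[1:] + [len(order)])]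
--     return order, comps
-- ===== Notes on version B (the rewrite author's own statement) =====
-- stated objective: alternative
-- what changed: Replaces A's recursive dfs that grows nested component lists (plus a parent array) by an iterative explicit-stack DFS producing one flat visit order together with the start index of each component, the component lists being recovered at the end by slicing the flat order at those cut indices.
import Mathlib
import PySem

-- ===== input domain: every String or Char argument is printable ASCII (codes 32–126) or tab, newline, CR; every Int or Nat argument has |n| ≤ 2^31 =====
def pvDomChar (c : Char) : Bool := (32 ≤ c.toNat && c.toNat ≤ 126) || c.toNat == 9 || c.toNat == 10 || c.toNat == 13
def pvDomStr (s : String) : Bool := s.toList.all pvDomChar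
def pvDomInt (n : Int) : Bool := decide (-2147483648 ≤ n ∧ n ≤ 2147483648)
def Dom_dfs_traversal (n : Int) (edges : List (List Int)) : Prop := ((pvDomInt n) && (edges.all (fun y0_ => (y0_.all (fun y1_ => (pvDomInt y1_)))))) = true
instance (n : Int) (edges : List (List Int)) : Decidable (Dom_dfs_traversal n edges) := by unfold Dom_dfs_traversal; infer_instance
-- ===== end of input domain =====

-- B replaces A's recursive dfs that grows nested component lists (and a parent array) by an
-- iterative explicit-stack DFS producing one flat visit order plus the start index of each
-- component; the component lists are recovered at the end by slicing the flat order at the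
-- cut indices (objective: alternative decomposition, same asymptotic cost).

-- Python list index normalisation (negative indices count from the end); exact for -n ≤ i < n.
def pvNidx (n s : Int) : Nat := (if s < 0 then s + n else s).toNat

-- termination helper for both DFS ports: marking an unvisited slot strictly lowers the number
-- of `false` entries (cited by name in decreasing_by)
theorem pv_count_set_lt (v : List Bool) (i : Nat) (h : v.getD i true = false) :
    (v.set i true).count false < v.count false := by
  induction v generalizing i with
  | nil => simp [List.getD] at h
  | cons b t ih =>
    cases i with
    | zero =>
      simp [List.getD] at h
      subst h
      simp
    | succ j =>
      have h' : t.getD j true = false := by simpa [List.getD] using h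
      have := ih j h'
      simp only [List.set, List.count_cons]
      omega

-- ===== PORT A =====
-- A builds the undirected adjacency list with two separate appends per edge
def pvBuildAdj (n : Int) (edges : List (List Int)) : List (List Int) :=
  edges.foldl (fun a e =>
    let u := e.getD 0 0
    let v := e.getD 1 0
    let a1 := a.modify (pvNidx n u) (· ++ [v])
    a1.modify (pvNidx n v) (· ++ [u]))
    (List.replicate n.toNat [])

-- A's recursive dfs: `pending` is the neighbour list still to be scanned at the current node;
-- the nested first call runs dfs(w), the second resumes the loop.  The subtype carries the
-- invariant (result's unvisited count ≤ input's) needed only for termination.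
def pvDfsA (n : Int) (adj : List (List Int)) (visited : List Bool) (captured : List Int)
    (cc : List (List Int)) (pending : List Int) :
    {r : List Bool × List Int × List (List Int) // r.1.count false ≤ visited.count false} :=
  match pending with
  | [] => ⟨(visited, captured, cc), Nat.le_refl _⟩
  | w :: rest =>
    let i := pvNidx n w
    if h : visited.getD i true then
      let r := pvDfsA n adj visited captured cc rest
      ⟨r.val, r.property⟩
    else
      let st := pvDfsA n adj (visited.set i true) (captured ++ [w])
          (cc.dropLast ++ [cc.getLastD [] ++ [w]]) (adj.getD i [])
      let r := pvDfsA n adj st.val.1 st.val.2.1 st.val.2.2 rest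
      ⟨r.val, Nat.le_trans r.property (Nat.le_trans st.property
        (Nat.le_of_lt (pv_count_set_lt visited i (by simpa using h))))⟩
termination_by (visited.count false, pending.length)
decreasing_by
  · apply Prod.Lex.right; simp
  · apply Prod.Lex.left; exact pv_count_set_lt visited i (by simpa using h)
  · apply Prod.Lex.left
    exact Nat.lt_of_le_of_lt st.property (pv_count_set_lt visited i (by simpa using h))

def dfs_traversal (n : Int) (edges : List (List Int)) : List Int × List (List Int) :=
  let adj := pvBuildAdj n edges
  let st := (PySem.List.pyRange 0 n 1).foldl
    (fun (st : List Bool × List Int × List (List Int)) i =>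
      if st.1.getD (pvNidx n i) true then st
      else (pvDfsA n adj st.1 st.2.1 (st.2.2 ++ [[]]) [i]).val)
    (List.replicate n.toNat false, [], [])
  (st.2.1, st.2.2)

-- ===== PORT B =====
-- B builds the adjacency list via an inner loop over the two directed pairs of each edge
def pvAdjB (n : Int) (edges : List (List Int)) : List (List Int) :=
  edges.foldl (fun a e =>
    [(e.getD 0 0, e.getD 1 0), (e.getD 1 0, e.getD 0 0)].foldl
      (fun a p => a.modify (pvNidx n p.1) (· ++ [p.2])) a)
    (List.replicate n.toNat [])

-- B's inner while-loop: the Python stack (top = end, neighbours pushed reversed) is modelled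
-- with the top at the list head, so extend(reversed(adj[s])) + pop-last is pushing adj[s]
-- in order at the head — the same pops in the same order; marks on pop, appends to the flat order
def pvDfsB (n : Int) (adj : List (List Int)) (visited : List Bool) (order : List Int)
    (stack : List Int) : List Bool × List Int :=
  match stack with
  | [] => (visited, order)
  | s :: rest =>
    let i := pvNidx n s
    if h : visited.getD i true then pvDfsB n adj visited order rest
    else pvDfsB n adj (visited.set i true) (order ++ [s]) (adj.getD i [] ++ rest)
termination_by (visited.count false, stack.length)
decreasing_by
  · apply Prod.Lex.right; simp
  · apply Prod.Lex.left; exact pv_count_set_lt visited i (by simpa using h)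

def dfs_traversal_alt (n : Int) (edges : List (List Int)) : List Int × List (List Int) :=
  let adj := pvAdjB n edges
  let st := (PySem.List.pyRange 0 n 1).foldl
    (fun (st : List Bool × List Int × List Int) i =>
      if st.1.getD (pvNidx n i) true then st
      else
        let cuts := st.2.2 ++ [(st.2.1.length : Int)]
        let r := pvDfsB n adj st.1 st.2.1 [i]
        (r.1, r.2, cuts))
    (List.replicate n.toNat false, [], [])
  let order := st.2.1
  let cuts := st.2.2
  (order,
    (cuts.zip (PySem.List.slice cuts (some 1) none ++ [(order.length : Int)])).map
      (fun p => PySem.List.slice order (some p.1) (some p.2)))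

-- ===== PRECONDITION & SPEC =====
-- Pre_ = exactly the inputs where Python A returns: every edge has at least two entries and
-- both endpoints are in Python's index range -n ≤ x < n (otherwise A raises IndexError).
def Pre_dfs_traversal (n : Int) (edges : List (List Int)) : Prop :=
  ∀ e ∈ edges, 2 ≤ e.length ∧ (-n ≤ e.getD 0 0 ∧ e.getD 0 0 < n) ∧ (-n ≤ e.getD 1 0 ∧ e.getD 1 0 < n)
instance (n : Int) (edges : List (List Int)) : Decidable (Pre_dfs_traversal n edges) := by
  unfold Pre_dfs_traversal; infer_instance

def pvWitness_dfs_traversal : Int × List (List Int) := (4, [[0, 1], [1, 2], [-1, 0]])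

def Spec_dfs_traversal (n : Int) (edges : List (List Int)) (out : List Int × List (List Int)) : Prop :=
  out = dfs_traversal_alt n edges
instance (n : Int) (edges : List (List Int)) (out : List Int × List (List Int)) :
    Decidable (Spec_dfs_traversal n edges out) := by unfold Spec_dfs_traversal; infer_instance

-- ===== CLAIM (what is proved, stated in full; the proofs are below) =====
def Claim_equal_dfs_traversal : Prop := ∀ (n : Int) (edges : List (List Int)),
  Dom_dfs_traversal n edges → Pre_dfs_traversal n edges →
  Spec_dfs_traversal n edges (dfs_traversal n edges)

-- ===== LEMMAS AND PROOFS =====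

-- the two adjacency builders perform the same two appends per edge
theorem pvAdjB_eq (n : Int) (edges : List (List Int)) : pvAdjB n edges = pvBuildAdj n edges := rfl

-- single Nat measure for the strong inductions below
def pvMaxAdj (adj : List (List Int)) : Nat := adj.foldr (fun l m => max l.length m) 0

theorem pv_getD_le (adj : List (List Int)) (i : Nat) :
    (adj.getD i []).length ≤ pvMaxAdj adj := by
  induction adj generalizing i with
  | nil => simp [List.getD]
  | cons a t ih =>
    cases i with
    | zero =>
      simp only [pvMaxAdj, List.foldr, List.getD_cons_zero]
      exact Nat.le_max_left _ _
    | succ j =>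
      have := ih j
      simp only [pvMaxAdj, List.foldr, List.getD_cons_succ] at *
      omega

def pvMeasure (adj : List (List Int)) (v : List Bool) (stack : List Int) : Nat :=
  v.count false * (pvMaxAdj adj + 1) + stack.length

theorem pv_measure_step (adj : List (List Int)) (v : List Bool) (i : Nat) (s : Int)
    (rest : List Int) (h : v.getD i true = false) :
    pvMeasure adj (v.set i true) (adj.getD i [] ++ rest) < pvMeasure adj v (s :: rest) := by
  have h1 := pv_count_set_lt v i h
  have h2 := pv_getD_le adj i
  unfold pvMeasure
  have h3 : ((v.set i true).count false + 1) * (pvMaxAdj adj + 1) ≤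
      v.count false * (pvMaxAdj adj + 1) := Nat.mul_le_mul_right _ (by omega)
  have h4 : ((v.set i true).count false + 1) * (pvMaxAdj adj + 1) =
      (v.set i true).count false * (pvMaxAdj adj + 1) + (pvMaxAdj adj + 1) := by ring
  rw [h4] at h3
  simp only [List.length_append, List.length_cons]
  omega

-- accumulator lemma for B's flat order list
theorem pvDfsB_acc (n : Int) (adj : List (List Int)) :
    ∀ (k : Nat) (v : List Bool) (stack : List Int) (c : List Int),
      pvMeasure adj v stack ≤ k →
      pvDfsB n adj v c stack =
        ((pvDfsB n adj v [] stack).1, c ++ (pvDfsB n adj v [] stack).2) := by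
  intro k
  induction k with
  | zero =>
    intro v stack c hk
    cases stack with
    | nil => simp [pvDfsB]
    | cons s rest => simp [pvMeasure] at hk
  | succ k ih =>
    intro v stack c hk
    cases stack with
    | nil => simp [pvDfsB]
    | cons s rest =>
      by_cases h : v.getD (pvNidx n s) true = true
      · have hm : pvMeasure adj v rest ≤ k := by simp [pvMeasure] at hk ⊢; omega
        simp only [pvDfsB, dif_pos h]
        exact ih v rest c hm
      · have hf : v.getD (pvNidx n s) true = false := by simpa using h
        have hm : pvMeasure adj (v.set (pvNidx n s) true) (adj.getD (pvNidx n s) [] ++ rest) ≤ k := by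
          have := pv_measure_step adj v (pvNidx n s) s rest hf
          omega
        simp only [pvDfsB, dif_neg h, List.nil_append]
        rw [ih _ _ (c ++ [s]) hm, ih _ _ [s] hm]
        simp

-- splitting B's stack
theorem pvDfsB_append (n : Int) (adj : List (List Int)) :
    ∀ (k : Nat) (v : List Bool) (xs : List Int) (c ys : List Int),
      pvMeasure adj v xs ≤ k →
      pvDfsB n adj v c (xs ++ ys) =
        pvDfsB n adj (pvDfsB n adj v c xs).1 (pvDfsB n adj v c xs).2 ys := by
  intro k
  induction k with
  | zero =>
    intro v xs c ys hk
    cases xs with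
    | nil => simp [pvDfsB]
    | cons s rest => simp [pvMeasure] at hk
  | succ k ih =>
    intro v xs c ys hk
    cases xs with
    | nil => simp [pvDfsB]
    | cons s rest =>
      by_cases h : v.getD (pvNidx n s) true = true
      · have hm : pvMeasure adj v rest ≤ k := by simp [pvMeasure] at hk ⊢; omega
        simp only [List.cons_append, pvDfsB, dif_pos h]
        exact ih v rest c ys hm
      · have hf : v.getD (pvNidx n s) true = false := by simpa using h
        have hm : pvMeasure adj (v.set (pvNidx n s) true) (adj.getD (pvNidx n s) [] ++ rest) ≤ k := by
          have := pv_measure_step adj v (pvNidx n s) s rest hf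
          omega
        simp only [List.cons_append, pvDfsB, dif_neg h]
        rw [← List.append_assoc]
        exact ih _ _ (c ++ [s]) ys hm

-- B never un-marks a node
theorem pvDfsB_count (n : Int) (adj : List (List Int)) :
    ∀ (k : Nat) (v : List Bool) (stack : List Int) (c : List Int),
      pvMeasure adj v stack ≤ k →
      (pvDfsB n adj v c stack).1.count false ≤ v.count false := by
  intro k
  induction k with
  | zero =>
    intro v stack c hk
    cases stack with
    | nil => simp [pvDfsB]
    | cons s rest => simp [pvMeasure] at hk
  | succ k ih =>
    intro v stack c hk
    cases stack with
    | nil => simp [pvDfsB]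
    | cons s rest =>
      by_cases h : v.getD (pvNidx n s) true = true
      · have hm : pvMeasure adj v rest ≤ k := by simp [pvMeasure] at hk ⊢; omega
        simpa only [pvDfsB, dif_pos h] using ih v rest c hm
      · have hf : v.getD (pvNidx n s) true = false := by simpa using h
        have hm : pvMeasure adj (v.set (pvNidx n s) true) (adj.getD (pvNidx n s) [] ++ rest) ≤ k := by
          have := pv_measure_step adj v (pvNidx n s) s rest hf
          omega
        have := ih (v.set (pvNidx n s) true) (adj.getD (pvNidx n s) [] ++ rest) (c ++ [s]) hm
        have hlt := pv_count_set_lt v (pvNidx n s) hf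
        simp only [pvDfsB, dif_neg h]
        omega

-- appending to the last component
def pvPushAll (cc : List (List Int)) (l : List Int) : List (List Int) :=
  cc.dropLast ++ [cc.getLastD [] ++ l]

theorem pvPushAll_nil (cc : List (List Int)) (h : cc ≠ []) : pvPushAll cc [] = cc := by
  unfold pvPushAll
  simp only [List.append_nil]
  rw [List.getLastD_eq_getLast?, List.getLast?_eq_some_getLast h, Option.getD_some]
  exact List.dropLast_concat_getLast h

theorem pvPushAll_pushAll (cc : List (List Int)) (a b : List Int) :
    pvPushAll (pvPushAll cc a) b = pvPushAll cc (a ++ b) := by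
  unfold pvPushAll
  simp [List.dropLast_concat, List.getLastD_concat]

theorem pvPushAll_ne_nil (cc : List (List Int)) (l : List Int) : pvPushAll cc l ≠ [] := by
  unfold pvPushAll; simp

-- A's recursive dfs in terms of B's stack loop
theorem pvDfsA_eq (n : Int) (adj : List (List Int)) :
    ∀ (k : Nat) (v : List Bool) (pending cap : List Int) (cc : List (List Int)),
      cc ≠ [] → pvMeasure adj v pending ≤ k →
      (pvDfsA n adj v cap cc pending).val =
        ((pvDfsB n adj v [] pending).1, cap ++ (pvDfsB n adj v [] pending).2,
          pvPushAll cc (pvDfsB n adj v [] pending).2) := by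
  intro k
  induction k with
  | zero =>
    intro v pending cap cc hcc hk
    cases pending with
    | nil => simp [pvDfsA, pvDfsB, pvPushAll_nil cc hcc]
    | cons s rest => simp [pvMeasure] at hk
  | succ k ih =>
    intro v pending cap cc hcc hk
    cases pending with
    | nil => simp [pvDfsA, pvDfsB, pvPushAll_nil cc hcc]
    | cons w rest =>
      by_cases h : v.getD (pvNidx n w) true = true
      · have hm : pvMeasure adj v rest ≤ k := by simp [pvMeasure] at hk ⊢; omega
        simp only [pvDfsA, pvDfsB, dif_pos h]
        exact ih v rest cap cc hcc hm
      · have hf : v.getD (pvNidx n w) true = false := by simpa using h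
        have hm : pvMeasure adj (v.set (pvNidx n w) true) (adj.getD (pvNidx n w) [] ++ rest) ≤ k := by
          have := pv_measure_step adj v (pvNidx n w) w rest hf
          omega
        have hmadj : pvMeasure adj (v.set (pvNidx n w) true) (adj.getD (pvNidx n w) []) ≤ k := by
          simp [pvMeasure, List.length_append] at hm ⊢; omega
        set q := pvDfsB n adj (v.set (pvNidx n w) true) [] (adj.getD (pvNidx n w) []) with hq
        have hqcount : q.1.count false ≤ (v.set (pvNidx n w) true).count false := by
          rw [hq]; exact pvDfsB_count n adj k _ _ [] hmadj
        have hmrest : pvMeasure adj q.1 rest ≤ k := by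
          simp only [pvMeasure] at hm ⊢
          have h5 : q.1.count false * (pvMaxAdj adj + 1) ≤
              (v.set (pvNidx n w) true).count false * (pvMaxAdj adj + 1) :=
            Nat.mul_le_mul_right _ hqcount
          simp only [List.length_append] at hm
          omega
        have hB : pvDfsB n adj v [] (w :: rest) =
            ((pvDfsB n adj q.1 [] rest).1, [w] ++ q.2 ++ (pvDfsB n adj q.1 [] rest).2) := by
          have h1 : pvDfsB n adj v [] (w :: rest) =
              pvDfsB n adj (v.set (pvNidx n w) true) [w] (adj.getD (pvNidx n w) [] ++ rest) := by
            simp only [pvDfsB, dif_neg h, List.nil_append]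
          rw [h1, pvDfsB_append n adj k _ _ [w] rest hmadj]
          rw [pvDfsB_acc n adj k _ _ [w] hmadj]
          rw [pvDfsB_acc n adj k q.1 rest ([w] ++ q.2) hmrest]
        simp only [pvDfsA, dif_neg h]
        rw [ih (v.set (pvNidx n w) true) (adj.getD (pvNidx n w) []) (cap ++ [w])
              (cc.dropLast ++ [cc.getLastD [] ++ [w]]) (by simp) hmadj]
        rw [ih q.1 rest (cap ++ [w] ++ q.2)
              (pvPushAll (cc.dropLast ++ [cc.getLastD [] ++ [w]]) q.2)
              (pvPushAll_ne_nil _ _) hmrest]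
        rw [hB]
        have hcc1 : cc.dropLast ++ [cc.getLastD [] ++ [w]] = pvPushAll cc [w] := rfl
        rw [hcc1, pvPushAll_pushAll, pvPushAll_pushAll]
        simp [List.append_assoc]

-- the common reference loop: fold accumulating (visited, list of components)
def pvCCFold (n : Int) (adj : List (List Int)) (is_ : List Int)
    (st0 : List Bool × List (List Int)) : List Bool × List (List Int) :=
  is_.foldl (fun (st : List Bool × List (List Int)) i =>
      if st.1.getD (pvNidx n i) true then st
      else
        let r := pvDfsB n adj st.1 [] [i]
        (r.1, st.2 ++ [r.2])) st0

-- A's outer loop over range(n) in terms of pvCCFold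
theorem pv_fold_A (n : Int) (adj : List (List Int)) :
    ∀ (is_ : List Int) (v : List Bool) (cc : List (List Int)),
      is_.foldl (fun (st : List Bool × List Int × List (List Int)) i =>
          if st.1.getD (pvNidx n i) true then st
          else (pvDfsA n adj st.1 st.2.1 (st.2.2 ++ [[]]) [i]).val)
        (v, cc.flatten, cc) =
      ((pvCCFold n adj is_ (v, cc)).1, (pvCCFold n adj is_ (v, cc)).2.flatten,
        (pvCCFold n adj is_ (v, cc)).2) := by
  intro is_
  induction is_ with
  | nil => intro v cc; simp [pvCCFold]
  | cons i t ih =>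
    intro v cc
    simp only [List.foldl, pvCCFold]
    by_cases h : v.getD (pvNidx n i) true = true
    · simp only [h, if_pos]
      exact ih v cc
    · simp only [h, if_neg, Bool.false_eq_true, not_false_iff]
      set p := pvDfsB n adj v [] [i] with hp
      have hA : (pvDfsA n adj v cc.flatten (cc ++ [[]]) [i]).val =
          (p.1, cc.flatten ++ p.2, cc ++ [p.2]) := by
        rw [pvDfsA_eq n adj (pvMeasure adj v [i]) v [i] cc.flatten (cc ++ [[]])
              (by simp) (Nat.le_refl _)]
        have : pvPushAll (cc ++ [[]]) p.2 = cc ++ [p.2] := by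
          unfold pvPushAll
          simp
        rw [← hp, this]
      rw [hA]
      have : cc.flatten ++ p.2 = (cc ++ [p.2]).flatten := by simp
      rw [this]
      exact ih p.1 (cc ++ [p.2])

-- the component start indices corresponding to a component list (off = length already emitted)
def pvCuts (cc : List (List Int)) (off : Int) : List Int :=
  match cc with
  | [] => []
  | c :: t => off :: pvCuts t (off + c.length)

theorem pvCuts_concat (cc : List (List Int)) (c : List Int) :
    ∀ (off : Int), pvCuts (cc ++ [c]) off = pvCuts cc off ++ [off + cc.flatten.length] := by
  induction cc with
  | nil => intro off; simp [pvCuts]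
  | cons a t ih =>
    intro off
    simp only [List.cons_append, pvCuts, ih, List.flatten_cons, List.length_append]
    push_cast
    ring_nf

-- B's outer loop over range(n) in terms of pvCCFold
theorem pv_fold_B (n : Int) (adj : List (List Int)) :
    ∀ (is_ : List Int) (v : List Bool) (cc : List (List Int)),
      is_.foldl (fun (st : List Bool × List Int × List Int) i =>
          if st.1.getD (pvNidx n i) true then st
          else
            let cuts := st.2.2 ++ [(st.2.1.length : Int)]
            let r := pvDfsB n adj st.1 st.2.1 [i]
            (r.1, r.2, cuts))
        (v, cc.flatten, pvCuts cc 0) =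
      ((pvCCFold n adj is_ (v, cc)).1, (pvCCFold n adj is_ (v, cc)).2.flatten,
        pvCuts (pvCCFold n adj is_ (v, cc)).2 0) := by
  intro is_
  induction is_ with
  | nil => intro v cc; simp [pvCCFold]
  | cons i t ih =>
    intro v cc
    simp only [List.foldl, pvCCFold]
    by_cases h : v.getD (pvNidx n i) true = true
    · simp only [h, if_pos]
      exact ih v cc
    · simp only [h, if_neg, Bool.false_eq_true, not_false_iff]
      set p := pvDfsB n adj v [] [i] with hp
      have hacc : pvDfsB n adj v cc.flatten [i] = (p.1, cc.flatten ++ p.2) := by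
        rw [pvDfsB_acc n adj (pvMeasure adj v [i]) v [i] cc.flatten (Nat.le_refl _), ← hp]
      have hcuts : pvCuts cc 0 ++ [(cc.flatten.length : Int)] = pvCuts (cc ++ [p.2]) 0 := by
        rw [pvCuts_concat]
        simp
      have hfl : cc.flatten ++ p.2 = (cc ++ [p.2]).flatten := by simp
      simp only [hacc, hcuts, hfl]
      exact ih p.1 (cc ++ [p.2])

-- slicing the flat order at the cut indices recovers the component list
theorem pv_slices_eq (cc : List (List Int)) :
    ∀ (pre : List Int),
      ((pvCuts cc pre.length).zip
          ((pvCuts cc pre.length).tail ++ [((pre ++ cc.flatten).length : Int)])).map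
        (fun p => PySem.List.slice (pre ++ cc.flatten) (some p.1) (some p.2)) = cc := by
  induction cc with
  | nil => intro pre; simp [pvCuts]
  | cons c t ih =>
    intro pre
    have hhead : PySem.List.slice (pre ++ (c :: t).flatten)
        (some (pre.length : Int)) (some ((pre.length : Int) + (c.length : Int))) = c := by
      rw [PySem.List.slice_natCast_add, List.flatten_cons, List.drop_left, List.take_left]
    cases t with
    | nil =>
      have hlen : ((pre ++ (c :: ([] : List (List Int))).flatten).length : Int) =
          (pre.length : Int) + (c.length : Int) := by simp
      simp only [pvCuts, List.tail_cons, List.nil_append, List.zip_cons_cons,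
        List.zip_nil_left, List.map_cons, List.map_nil, hlen, hhead]
    | cons c2 t2 =>
      have hrest := ih (pre ++ c)
      have ho : (((pre ++ c).length : Nat) : Int) = (pre.length : Int) + (c.length : Int) := by
        push_cast [List.length_append]; ring
      have hl : (pre ++ c) ++ (c2 :: t2).flatten = pre ++ (c :: c2 :: t2).flatten := by
        simp
      simp only [pvCuts, List.tail_cons, ho, hl] at hrest
      simp only [pvCuts, List.tail_cons, List.cons_append]
      rw [List.zip_cons_cons, List.map_cons, hhead, hrest]

-- ===== VERDICT (by name: the statement is the Claim_ definition above) =====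
theorem dfs_traversal_spec : Claim_equal_dfs_traversal := by
  intro n edges _ _
  unfold Spec_dfs_traversal dfs_traversal dfs_traversal_alt
  rw [pvAdjB_eq]
  dsimp only
  set adj := pvBuildAdj n edges
  have hA := pv_fold_A n adj (PySem.List.pyRange 0 n 1) (List.replicate n.toNat false) []
  have hB := pv_fold_B n adj (PySem.List.pyRange 0 n 1) (List.replicate n.toNat false) []
  simp only [List.flatten_nil, pvCuts] at hA hB
  rw [hA, hB]
  set cc := (pvCCFold n adj (PySem.List.pyRange 0 n 1)
    (List.replicate n.toNat false, [])).2 with hcc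
  have hsl := pv_slices_eq cc ([] : List Int)
  simp only [List.length_nil, Nat.cast_zero, List.nil_append] at hsl
  rw [PySem.List.slice_from_one, hsl]
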